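-- pv_equiv track=rewrite | github.com/VolodymyrAhafonov/MachLearnLib | utils/data/preparation/data_cleaner/BaseDataCleaner.py | convert_nonnumeric_attributes_to_numeric
-- ===== SOURCE A (Python) =====
-- from typing import Dict, Tuple
--
-- HOLE_SYMBOLS = ['', '-', '?']
--
-- def is_float(s: str) -> bool:
--     """
--     Check if string is float.
--
--     :param s: input string
--     :return: True if s is number, False otherwise
--     """
--     try:
--         float(s)
--         return True
--     except ValueError:
--         return False
--
-- def convert_nonnumeric_attributes_to_numeric(data: list) -> Tuple[list, Dict[int, str]]:
--     """
--     Convert nonnumeric attributes to numeric attributes.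
--
--     :param data: input data
--     :return: tuple of converted data and dict where key - numeric value of attribute,
--     value - nonnumeric value of proper attribute
--     """
--     attribute_map = {}
--     current_attribute_value = 0
--
--     rows = len(data)
--     cols = len(data[0])
--
--     for i in range(rows):
--         for j in range(cols):
--             elem = data[i][j]
--             # check if element is not float and is not a hole symbol
--             if not is_float(elem) and elem not in HOLE_SYMBOLS:
--                 # check if symbolic attribute is already in map
--                 if elem in attribute_map:
--                     data[i][j] = str(attribute_map[elem])
--                 else:
--                     # symbolic attribute is not in attribute map, encode it to numeric and put in map
--                     attribute_map[elem] = current_attribute_value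
--                     current_attribute_value += 1
--                     data[i][j] = str(attribute_map[elem])
--
--     result_dict = {}
--     # invert attribute map
--     for key in attribute_map.keys():
--         result_dict[attribute_map[key]] = key
--
--     return data, result_dict
-- ===== SOURCE B (Python) =====
-- HOLE_SYMBOLS = ['', '-', '?']
--
-- def is_float(s: str) -> bool:
--     try:
--         float(s)
--         return True
--     except ValueError:
--         return False
--
-- def convert_nonnumeric_attributes_to_numeric(data: list):
--     # Two passes: first collect the distinct symbolic values in first-encounter
--     # order, build the symbol->code map once, then rewrite the cells in place.
--     cols = len(data[0])
--     seen = set()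
--     symbols = []
--     for row in data:
--         for elem in row[:cols]:
--             if not is_float(elem) and elem not in HOLE_SYMBOLS and elem not in seen:
--                 seen.add(elem)
--                 symbols.append(elem)
--     code = {sym: k for k, sym in enumerate(symbols)}
--     for row in data:
--         row[:cols] = [str(code[e]) if e in code else e for e in row[:cols]]
--     return data, dict(enumerate(symbols))
-- ===== Notes on version B (the rewrite author's own statement) =====
-- stated objective: alternative
-- what changed: Replaces A's single index-looped pass that interleaves growing the symbol->code dict with rewriting each cell by two structural passes: first collect the distinct symbolic values in first-encounter order (seen-set + ordered list) and build the whole code map up front, then rewrite the cells through that fixed map (pass 2 is a pure lookup, no is_float re-test), with the result dict built directly from enumerate(symbols) instead of inverting the map.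
import Mathlib
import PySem

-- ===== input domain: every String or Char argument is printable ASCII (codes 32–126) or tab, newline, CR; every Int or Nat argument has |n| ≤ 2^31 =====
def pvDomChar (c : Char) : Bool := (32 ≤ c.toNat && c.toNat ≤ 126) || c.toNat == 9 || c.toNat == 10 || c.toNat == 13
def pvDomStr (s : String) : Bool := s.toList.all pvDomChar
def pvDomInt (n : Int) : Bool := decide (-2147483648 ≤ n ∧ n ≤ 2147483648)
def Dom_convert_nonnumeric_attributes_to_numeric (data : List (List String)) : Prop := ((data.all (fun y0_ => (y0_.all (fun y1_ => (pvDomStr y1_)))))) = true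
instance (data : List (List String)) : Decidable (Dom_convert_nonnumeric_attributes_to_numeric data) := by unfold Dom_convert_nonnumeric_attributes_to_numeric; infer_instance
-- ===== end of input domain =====

-- B collects the distinct symbolic values in a first pass, builds the code map once,
-- then rewrites the cells in a second pass (objective: alternative decomposition; the
-- Python mutates `data` in place — the equivalence proved here is about the return value,
-- whose first component is that same list).

-- ===== shared helper: exact port of `is_float` (CPython float()-acceptance), hand-written
-- (PySem has no float parser); exact on the printable-ASCII + tab/newline/CR domain =====
def pvIsWs (c : Char) : Bool :=
  c = ' ' || c = '\t' || c = '\n' || c = '\r' || c = '\x0b' || c = '\x0c'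

-- consume digits with single underscores allowed between digits, return the rest
def pvDigTail : List Char → List Char
  | '_' :: c :: rest => if c.isDigit then pvDigTail rest else '_' :: c :: rest
  | c :: rest => if c.isDigit then pvDigTail rest else c :: rest
  | [] => []

-- a Python digitpart: at least one digit; `none` if absent
def pvDigPart? : List Char → Option (List Char)
  | c :: rest => if c.isDigit then some (pvDigTail rest) else none
  | [] => none

def pvDropSign : List Char → List Char
  | '+' :: r => r
  | '-' :: r => r
  | l => l

-- an optional exponent part that must consume the whole rest
def pvExpOk : List Char → Bool
  | [] => true
  | c :: r => (c = 'e' || c = 'E') && (pvDigPart? (pvDropSign r) == some [])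

def pvFracExp (l : List Char) (hadInt : Bool) : Bool :=
  match l with
  | '.' :: r =>
    match pvDigPart? r with
    | some r2 => pvExpOk r2
    | none => hadInt && pvExpOk r
  | _ => hadInt && pvExpOk l

def pvNumOk (l : List Char) : Bool :=
  match pvDigPart? l with
  | some r => pvFracExp r true
  | none => pvFracExp l false

def isFloatStr (s : String) : Bool :=
  let l := ((s.toList.dropWhile pvIsWs).reverse.dropWhile pvIsWs).reverse
  let l := pvDropSign l
  let low := l.map PySem.Chars.lowerChar
  low == "inf".toList || low == "infinity".toList || low == "nan".toList || pvNumOk l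

def holeSymbols : List String := ["", "-", "?"]

-- ===== PORT A =====
-- the body of the inner `for j in range(cols)` loop of A
def pvCellStepA (st : List (List String) × PySem.Dict String Int × Int) (i j : Int) :
    List (List String) × PySem.Dict String Int × Int :=
  let d := st.1; let m := st.2.1; let cur := st.2.2
  let elem := PySem.List.pyGetD (PySem.List.pyGetD d i []) j ""
  if !isFloatStr elem && !(holeSymbols.contains elem) then
    match m.get? elem with
    | some v =>
      (PySem.List.pySetD d i (PySem.List.pySetD (PySem.List.pyGetD d i []) j (PySem.Int.toStr v)), m, cur)
    | none =>
      let m' := m.insert elem cur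
      (PySem.List.pySetD d i (PySem.List.pySetD (PySem.List.pyGetD d i []) j (PySem.Int.toStr (m'.getD elem 0))), m', cur + 1)
  else st

-- the body of the outer `for i in range(rows)` loop of A
def pvRowStepA (cols : Int) (st : List (List String) × PySem.Dict String Int × Int) (i : Int) :
    List (List String) × PySem.Dict String Int × Int :=
  (PySem.List.pyRange 0 cols 1).foldl (fun s j => pvCellStepA s i j) st

def convert_nonnumeric_attributes_to_numeric (data : List (List String)) :
    List (List String) × (List (Int × String)) :=
  let rows : Int := PySem.List.len data
  let cols : Int := PySem.List.len (PySem.List.pyGetD data 0 [])   -- len(data[0]); data ≠ [] under Pre_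
  let st := (PySem.List.pyRange 0 rows 1).foldl (pvRowStepA cols)
      (data, (PySem.Dict.empty : PySem.Dict String Int), (0 : Int))
  let m := st.2.1
  -- invert attribute map
  let result := m.keys.foldl (fun (r : PySem.Dict Int String) k => r.insert (m.getD k 0) k)
      (PySem.Dict.empty : PySem.Dict Int String)
  (st.1, result.items)

-- ===== PORT B =====
def convert_nonnumeric_attributes_to_numeric_alt (data : List (List String)) :
    List (List String) × (List (Int × String)) :=
  let cols : Nat := (data.headD []).length   -- len(data[0]); data ≠ [] under Pre_
  let p := data.foldl (fun (p : PySem.Set String × List String) row =>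
      (row.take cols).foldl (fun (p : PySem.Set String × List String) elem =>
        if !isFloatStr elem && !(holeSymbols.contains elem) && !(PySem.Set.contains p.1 elem)
        then (PySem.Set.add p.1 elem, p.2 ++ [elem]) else p) p)
      ((PySem.Set.empty : PySem.Set String), ([] : List String))
  let symbols := p.2
  let code : PySem.Dict String Int :=
    (PySem.List.enumerate symbols).foldl (fun d p => d.insert p.2 p.1) PySem.Dict.empty
  let data2 := data.map (fun row =>
      ((row.take cols).map (fun e =>
        match code.get? e with | some c => PySem.Int.toStr c | none => e)) ++ row.drop cols)
  let res : PySem.Dict Int String :=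
    (PySem.List.enumerate symbols).foldl (fun d p => d.insert p.1 p.2) PySem.Dict.empty
  (data2, res.items)

-- ===== PRECONDITION & SPEC =====
-- Pre_ excludes exactly the inputs where A raises IndexError: empty data (data[0]),
-- and a row shorter than the first row (data[i][j] with j < len(data[0])).
def Pre_convert_nonnumeric_attributes_to_numeric (data : List (List String)) : Prop :=
  data ≠ [] ∧ ∀ row ∈ data, (data.headD []).length ≤ row.length

instance (data : List (List String)) : Decidable (Pre_convert_nonnumeric_attributes_to_numeric data) := by
  unfold Pre_convert_nonnumeric_attributes_to_numeric; infer_instance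

def pvWitness_convert_nonnumeric_attributes_to_numeric : List (List String) :=
  [["a", "5"], ["?", "a", "b"]]

def Spec_convert_nonnumeric_attributes_to_numeric (data : List (List String))
    (out : List (List String) × (List (Int × String))) : Prop :=
  out = convert_nonnumeric_attributes_to_numeric_alt data

instance (data : List (List String)) (out : List (List String) × (List (Int × String))) :
    Decidable (Spec_convert_nonnumeric_attributes_to_numeric data out) := by
  unfold Spec_convert_nonnumeric_attributes_to_numeric; infer_instance

-- ===== CLAIM (what is proved, stated in full; the proofs are below) =====
def Claim_equal_convert_nonnumeric_attributes_to_numeric : Prop :=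
  ∀ (data : List (List String)), Dom_convert_nonnumeric_attributes_to_numeric data →
    Pre_convert_nonnumeric_attributes_to_numeric data →
    Spec_convert_nonnumeric_attributes_to_numeric data (convert_nonnumeric_attributes_to_numeric data)

-- ===== LEMMAS AND PROOFS =====

-- abbreviations for the proof
def pvSymb (e : String) : Bool := !isFloatStr e && !(holeSymbols.contains e)

-- structural form of A's incremental cell processing
def pvCellF (st : PySem.Dict String Int × Int) (e : String) :
    String × PySem.Dict String Int × Int :=
  if pvSymb e then
    match st.1.get? e with
    | some v => (PySem.Int.toStr v, st)
    | none => (PySem.Int.toStr ((st.1.insert e st.2).getD e 0), st.1.insert e st.2, st.2 + 1)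
  else (e, st)

def pvProcCells (st : PySem.Dict String Int × Int) :
    List String → List String × PySem.Dict String Int × Int
  | [] => ([], st)
  | e :: rest =>
    let p := pvCellF st e
    let q := pvProcCells p.2 rest
    (p.1 :: q.1, q.2)

def pvProcRows (st : PySem.Dict String Int × Int) (cols : Nat) :
    List (List String) → List (List String) × PySem.Dict String Int × Int
  | [] => ([], st)
  | r :: rs =>
    let p := pvProcCells st (r.take cols)
    let q := pvProcRows p.2 cols rs
    ((p.1 ++ r.drop cols) :: q.1, q.2)

-- B's first pass, structurally
def pvCollectCells (syms : List String) (cells : List String) : List String :=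
  cells.foldl (fun acc e => if pvSymb e && !(acc.contains e) then acc ++ [e] else acc) syms

def pvCollectRows (syms : List String) (cols : Nat) (rows : List (List String)) : List String :=
  rows.foldl (fun acc r => pvCollectCells acc (r.take cols)) syms

def pvCodeOf (syms : List String) : PySem.Dict String Int :=
  (PySem.List.enumerate syms).foldl (fun d p => d.insert p.2 p.1) PySem.Dict.empty

def pvRw (code : PySem.Dict String Int) (e : String) : String :=
  match code.get? e with | some c => PySem.Int.toStr c | none => e

def pvInv (syms : List String) : Prop := syms.Nodup ∧ ∀ e ∈ syms, pvSymb e = true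


theorem pv_codeOf_aux (e : String) : ∀ (syms : List String) (d : PySem.Dict String Int) (s : Int), syms.Nodup →
    ((PySem.List.enumerate syms s).foldl (fun d p => d.insert p.2 p.1) d).get? e
    = match PySem.List.index? syms e with
      | some n => some (s + n)
      | none => d.get? e
  | [], d, s, _ => by simp [PySem.List.enumerate_nil, PySem.List.index?]
  | x :: xs, d, s, h => by
    rw [PySem.List.enumerate_cons]
    simp only [List.foldl_cons]
    rw [pv_codeOf_aux e xs (d.insert x s) (s + 1) h.of_cons]
    by_cases hxe : x = e
    · subst hxe
      have hx : x ∉ xs := (List.nodup_cons.mp h).1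
      rw [PySem.List.index?_cons_self]
      rw [(PySem.List.index?_eq_none_iff xs x).mpr hx]
      simp [PySem.Dict.get?_insert_self]
    · rw [PySem.List.index?_cons_of_ne xs hxe]
      cases hi : PySem.List.index? xs e with
      | none => exact PySem.Dict.get?_insert_of_ne d s (fun he => hxe he.symm)
      | some n => simp only [Option.map_some]; push_cast; ring_nf

theorem pv_get?_codeOf (syms : List String) (e : String) (h : syms.Nodup) :
    (pvCodeOf syms).get? e
    = match PySem.List.index? syms e with
      | some n => some ((n : Int))
      | none => none := by
  unfold pvCodeOf
  rw [pv_codeOf_aux e syms PySem.Dict.empty 0 h]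
  cases PySem.List.index? syms e <;> simp [PySem.Dict.get?_empty]

theorem pv_codeOf_snoc (syms : List String) (e : String) :
    pvCodeOf (syms ++ [e]) = (pvCodeOf syms).insert e (syms.length : Int) := by
  unfold pvCodeOf
  rw [PySem.List.enumerate_append, List.foldl_append]
  simp [PySem.List.enumerate_cons, PySem.List.enumerate_nil]

theorem pv_collectCells_prefix (cells : List String) : ∀ (syms : List String),
    syms <+: pvCollectCells syms cells := by
  induction cells with
  | nil => intro syms; exact List.prefix_refl _
  | cons e rest ih =>
    intro syms
    unfold pvCollectCells at *
    simp only [List.foldl_cons]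
    refine List.IsPrefix.trans ?_ (ih _)
    split
    · exact ⟨[e], rfl⟩
    · exact List.prefix_refl _

theorem pv_collectRows_prefix (rows : List (List String)) (cols : Nat) : ∀ (syms : List String),
    syms <+: pvCollectRows syms cols rows := by
  induction rows with
  | nil => intro syms; exact List.prefix_refl _
  | cons r rs ih =>
    intro syms
    unfold pvCollectRows at *
    simp only [List.foldl_cons]
    exact List.IsPrefix.trans (pv_collectCells_prefix _ _) (ih _)

theorem pv_mem_collectCells_of_mem (cells : List String) (syms : List String) (e : String)
    (h : e ∈ syms) : e ∈ pvCollectCells syms cells :=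
  (pv_collectCells_prefix cells syms).subset h

theorem pv_mem_collectCells_self (cells : List String) : ∀ (syms : List String) (e : String),
    pvSymb e = true → e ∈ cells → e ∈ pvCollectCells syms cells := by
  induction cells with
  | nil => intro syms e _ hmem; cases hmem
  | cons c rest ih =>
    intro syms e hs hmem
    unfold pvCollectCells at *
    simp only [List.foldl_cons]
    rcases List.mem_cons.mp hmem with rfl | hmem
    · by_cases hc : syms.contains e
      · apply pv_mem_collectCells_of_mem
        simp only [hs, hc]
        simp
        exact List.contains_iff_mem.mp hc
      · apply pv_mem_collectCells_of_mem
        simp only [hs, hc]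
        simp
    · exact ih _ _ hs hmem

theorem pv_inv_collectCells (cells : List String) : ∀ (syms : List String),
    pvInv syms → pvInv (pvCollectCells syms cells) := by
  induction cells with
  | nil => intro syms h; exact h
  | cons c rest ih =>
    intro syms h
    unfold pvCollectCells at *
    simp only [List.foldl_cons]
    apply ih
    by_cases hs : pvSymb c
    · by_cases hc : c ∈ syms
      · have : syms.contains c = true := List.contains_iff_mem.mpr hc
        simpa [hs, this, hc] using h
      · have hcc : syms.contains c = false := by
          simpa using fun hm => hc (List.contains_iff_mem.mp (by simpa using hm))
        simp only [hs, hcc, Bool.not_false, Bool.and_true, if_pos]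
        refine ⟨List.Nodup.append h.1 (List.nodup_singleton c) (by simpa using hc), ?_⟩
        intro x hx
        rcases List.mem_append.mp hx with hx | hx
        · exact h.2 x hx
        · simp at hx; subst hx; exact hs
    · have hs' : pvSymb c = false := by simpa using hs
      simpa [hs'] using h

theorem pv_inv_collectRows (rows : List (List String)) (cols : Nat) : ∀ (syms : List String),
    pvInv syms → pvInv (pvCollectRows syms cols rows) := by
  induction rows with
  | nil => intro syms h; exact h
  | cons r rs ih =>
    intro syms h
    unfold pvCollectRows at *
    simp only [List.foldl_cons]
    exact ih _ (pv_inv_collectCells _ _ h)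

theorem pv_get?_codeOf_mono (syms symsF : List String) (e : String)
    (hp : syms <+: symsF) (hF : symsF.Nodup) (he : e ∈ syms) :
    (pvCodeOf symsF).get? e = (pvCodeOf syms).get? e := by
  obtain ⟨t, rfl⟩ := hp
  rw [pv_get?_codeOf _ _ hF, pv_get?_codeOf _ _ (List.Nodup.of_append_left hF)]
  rw [PySem.List.index?_append_of_mem t he]

theorem pv_rw_mono (syms symsF : List String) (e : String)
    (hp : syms <+: symsF) (hF : symsF.Nodup) (hsymb : ∀ x ∈ symsF, pvSymb x = true)
    (hmem : pvSymb e = true → e ∈ syms) :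
    pvRw (pvCodeOf symsF) e = pvRw (pvCodeOf syms) e := by
  by_cases hs : pvSymb e
  · unfold pvRw; rw [pv_get?_codeOf_mono syms symsF e hp hF (hmem hs)]
  · have heF : e ∉ symsF := fun hm => hs (hsymb e hm)
    have heS : e ∉ syms := fun hm => heF (hp.subset hm)
    unfold pvRw
    rw [pv_get?_codeOf _ _ hF, pv_get?_codeOf _ _ (hF.sublist hp.sublist)]
    rw [(PySem.List.index?_eq_none_iff _ _).mpr heF, (PySem.List.index?_eq_none_iff _ _).mpr heS]


theorem pv_rw_of_not_mem (symsF : List String) (e : String)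
    (h : symsF.Nodup) (he : e ∉ symsF) :
    pvRw (pvCodeOf symsF) e = e := by
  unfold pvRw; rw [pv_get?_codeOf _ _ h, (PySem.List.index?_eq_none_iff _ _).mpr he]

theorem pv_procCells_collect (cells : List String) : ∀ (syms : List String), pvInv syms →
    pvProcCells (pvCodeOf syms, (syms.length : Int)) cells
    = (cells.map (pvRw (pvCodeOf (pvCollectCells syms cells))),
       pvCodeOf (pvCollectCells syms cells), ((pvCollectCells syms cells).length : Int)) := by
  induction cells with
  | nil => intro syms _; simp [pvProcCells, pvCollectCells]
  | cons e rest ih =>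
    intro syms hinv
    have hFinv : pvInv (pvCollectCells syms (e :: rest)) := pv_inv_collectCells _ _ hinv
    by_cases hs : pvSymb e
    · by_cases he : e ∈ syms
      · -- already known symbol
        obtain ⟨n, hn⟩ := Option.isSome_iff_exists.mp ((PySem.List.index?_isSome_iff _ _).mpr he)
        have hstep : pvCollectCells syms (e :: rest) = pvCollectCells syms rest := by
          unfold pvCollectCells
          simp only [List.foldl_cons, hs, List.contains_iff_mem.mpr he]
          simp
        have hget : (pvCodeOf syms).get? e = some (n : Int) := by
          rw [pv_get?_codeOf _ _ hinv.1, hn]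
        simp only [pvProcCells, pvCellF, hs, hget, if_pos, List.map_cons]
        rw [ih syms hinv, hstep]
        refine congrArg (fun x => (x :: _, _, _)) ?_
        have hp := pv_collectCells_prefix rest syms
        have hF := (pv_inv_collectCells rest syms hinv)
        rw [show pvRw (pvCodeOf (pvCollectCells syms rest)) e
              = PySem.Int.toStr (n : Int) from ?_]
        unfold pvRw
        rw [pv_get?_codeOf _ _ hF.1]
        rw [show PySem.List.index? (pvCollectCells syms rest) e = some n from ?_]
        obtain ⟨t, ht⟩ := hp
        rw [← ht] at *
        rw [PySem.List.index?_append_of_mem t he, hn]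
      · -- fresh symbol
        have hget : (pvCodeOf syms).get? e = none := by
          rw [pv_get?_codeOf _ _ hinv.1, (PySem.List.index?_eq_none_iff _ _).mpr he]
        have hcontains : syms.contains e = false := by
          simpa using fun hm => he (by simpa using hm)
        have hstep : pvCollectCells syms (e :: rest) = pvCollectCells (syms ++ [e]) rest := by
          unfold pvCollectCells
          simp only [List.foldl_cons, hs, hcontains]
          simp
        have hinv1 : pvInv (syms ++ [e]) := by
          refine ⟨List.Nodup.append hinv.1 (List.nodup_singleton e) (by simpa using he), ?_⟩
          intro x hx
          rcases List.mem_append.mp hx with hx | hx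
          · exact hinv.2 x hx
          · simp at hx; subst hx; exact hs
        have hlen : (syms.length : Int) + 1 = (((syms ++ [e]).length : Nat) : Int) := by
          simp
        simp only [pvProcCells, pvCellF, hs, hget, if_pos, List.map_cons]
        rw [PySem.Dict.getD_insert_self, ← pv_codeOf_snoc, hlen, ih (syms ++ [e]) hinv1, hstep]
        refine congrArg (fun x => (x :: _, _, _)) ?_
        have hp := pv_collectCells_prefix rest (syms ++ [e])
        have hF := (pv_inv_collectCells rest (syms ++ [e]) hinv1)
        rw [show pvRw (pvCodeOf (pvCollectCells (syms ++ [e]) rest)) e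
              = PySem.Int.toStr ((syms.length : Nat) : Int) from ?_]
        unfold pvRw
        rw [pv_get?_codeOf _ _ hF.1]
        rw [show PySem.List.index? (pvCollectCells (syms ++ [e]) rest) e = some syms.length from ?_]
        obtain ⟨t, ht⟩ := hp
        rw [← ht]
        rw [PySem.List.index?_append_of_mem t (by simp), PySem.List.index?_append_singleton_self syms e he]
    · -- not a symbolic value
      have hs' : pvSymb e = false := by simpa using hs
      have hstep : pvCollectCells syms (e :: rest) = pvCollectCells syms rest := by
        unfold pvCollectCells
        simp only [List.foldl_cons, hs']
        simp
      have hF := (pv_inv_collectCells rest syms hinv)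
      simp only [pvProcCells, pvCellF, hs', Bool.false_eq_true, ite_false, List.map_cons]
      rw [ih syms hinv, hstep]
      refine congrArg (fun x => (x :: _, _, _)) ?_
      have heF : e ∉ pvCollectCells syms rest := fun hm => by
        have := hF.2 e hm; rw [hs'] at this; exact Bool.false_ne_true this
      rw [pv_rw_of_not_mem _ _ hF.1 heF]

theorem pv_procRows_collect (cols : Nat) (rows : List (List String)) : ∀ (syms : List String), pvInv syms →
    pvProcRows (pvCodeOf syms, (syms.length : Int)) cols rows
    = (rows.map (fun r => (r.take cols).map (pvRw (pvCodeOf (pvCollectRows syms cols rows))) ++ r.drop cols),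
       pvCodeOf (pvCollectRows syms cols rows), ((pvCollectRows syms cols rows).length : Int)) := by
  induction rows with
  | nil => intro syms _; simp [pvProcRows, pvCollectRows]
  | cons r rs ih =>
    intro syms hinv
    have hstep : pvCollectRows syms cols (r :: rs) = pvCollectRows (pvCollectCells syms (r.take cols)) cols rs := by
      unfold pvCollectRows; simp [List.foldl_cons]
    have hinv1 : pvInv (pvCollectCells syms (r.take cols)) := pv_inv_collectCells _ _ hinv
    simp only [pvProcRows]
    rw [pv_procCells_collect (r.take cols) syms hinv, List.map_cons]
    simp only []
    rw [ih _ hinv1, hstep]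
    refine congrArg (fun x => ((x ++ r.drop cols) :: _, _, _)) ?_
    apply List.map_congr_left
    intro e hmem
    have hFinv := pv_inv_collectRows rs cols _ hinv1
    exact (pv_rw_mono (pvCollectCells syms (r.take cols)) (pvCollectRows (pvCollectCells syms (r.take cols)) cols rs)
      e (pv_collectRows_prefix rs cols _) hFinv.1 hFinv.2
      (fun hsymb => pv_mem_collectCells_self _ _ _ hsymb hmem)).symm

theorem pv_pyGetD_append_cons {α : Type} (pre : List α) (x : α) (post : List α) (d : α) :
    PySem.List.pyGetD (pre ++ x :: post) ((pre.length : Int)) d = x := by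
  rw [PySem.List.pyGetD_natCast]; simp

theorem pv_pySetD_append_cons {α : Type} (pre : List α) (x : α) (post : List α) (v : α) :
    PySem.List.pySetD (pre ++ x :: post) ((pre.length : Int)) v = pre ++ v :: post := by
  have h : pre.length < (pre ++ x :: post).length := by simp
  simp [PySem.List.pySetD, PySem.List.pySet?_natCast _ _ _ h]

theorem pv_cellStepA_eval (pre post : List (List String)) (rc pc : List String) (e : String)
    (st : PySem.Dict String Int × Int) :
    pvCellStepA (pre ++ (rc ++ e :: pc) :: post, st) ((pre.length : Int)) ((rc.length : Int))
    = (pre ++ (rc ++ (pvCellF st e).1 :: pc) :: post, (pvCellF st e).2) := by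
  unfold pvCellStepA pvCellF pvSymb
  simp only [pv_pyGetD_append_cons]
  by_cases hcond : (!isFloatStr e && !(holeSymbols.contains e)) = true
  · rw [if_pos hcond, if_pos hcond]
    cases hm : st.1.get? e with
    | some v => simp only [pv_pySetD_append_cons]
    | none => simp only [pv_pySetD_append_cons]
  · rw [if_neg hcond, if_neg hcond]

theorem pv_inner (k : Nat) : ∀ (rc pc : List String) (pre post : List (List String))
    (st : PySem.Dict String Int × Int), k ≤ pc.length →
    (PySem.List.pyRange (rc.length : Int) ((rc.length : Int) + (k : Int)) 1).foldl
        (fun s j => pvCellStepA s ((pre.length : Int)) j) (pre ++ (rc ++ pc) :: post, st)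
    = (pre ++ (rc ++ (pvProcCells st (pc.take k)).1 ++ pc.drop k) :: post,
       (pvProcCells st (pc.take k)).2) := by
  induction k with
  | zero =>
    intro rc pc pre post st _
    rw [PySem.List.pyRange_one_eq_nil (by simp)]
    simp [pvProcCells]
  | succ k ih =>
    intro rc pc pre post st hk
    cases pc with
    | nil => simp at hk
    | cons e pc' =>
      have hlt : (rc.length : Int) < (rc.length : Int) + ((k + 1 : Nat) : Int) := by push_cast; omega
      rw [PySem.List.pyRange_one_cons hlt, List.foldl_cons, pv_cellStepA_eval]
      have hrow : rc ++ (pvCellF st e).1 :: pc' = (rc ++ [(pvCellF st e).1]) ++ pc' := by simp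
      have hb1 : (rc.length : Int) + 1 = (((rc ++ [(pvCellF st e).1]).length : Nat) : Int) := by simp
      have hb2 : (rc.length : Int) + ((k + 1 : Nat) : Int)
          = (((rc ++ [(pvCellF st e).1]).length : Nat) : Int) + (k : Int) := by push_cast; omega
      rw [hrow, hb1, hb2, ih (rc ++ [(pvCellF st e).1]) pc' pre post (pvCellF st e).2 (by simpa using hk)]
      simp [pvProcCells, List.append_assoc]

theorem pv_outer (post : List (List String)) : ∀ (pre : List (List String))
    (st : PySem.Dict String Int × Int) (colsN : Nat),
    (∀ r ∈ post, colsN ≤ r.length) →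
    (PySem.List.pyRange (pre.length : Int) ((pre.length : Int) + (post.length : Int)) 1).foldl
        (pvRowStepA ((colsN : Nat) : Int)) (pre ++ post, st)
    = (pre ++ (pvProcRows st colsN post).1, (pvProcRows st colsN post).2) := by
  induction post with
  | nil =>
    intro pre st colsN _
    rw [PySem.List.pyRange_one_eq_nil (by simp)]
    simp [pvProcRows]
  | cons r rs ih =>
    intro pre st colsN hlen
    have hlt : (pre.length : Int) < (pre.length : Int) + (((r :: rs).length : Nat) : Int) := by
      push_cast [List.length_cons]; omega
    rw [PySem.List.pyRange_one_cons hlt, List.foldl_cons]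
    have hstep : pvRowStepA ((colsN : Nat) : Int) (pre ++ r :: rs, st) ((pre.length : Int))
        = (pre ++ ((pvProcCells st (r.take colsN)).1 ++ r.drop colsN) :: rs,
           (pvProcCells st (r.take colsN)).2) := by
      unfold pvRowStepA
      have happ := pv_inner colsN [] r pre rs st (hlen r (by simp))
      simp only [List.nil_append, List.length_nil, Nat.cast_zero, zero_add] at happ
      rw [happ]
    rw [hstep]
    have hb1 : (pre.length : Int) + 1
        = (((pre ++ [(pvProcCells st (r.take colsN)).1 ++ r.drop colsN]).length : Nat) : Int) := by simp
    have hb2 : (pre.length : Int) + (((r :: rs).length : Nat) : Int)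
        = (((pre ++ [(pvProcCells st (r.take colsN)).1 ++ r.drop colsN]).length : Nat) : Int) + ((rs.length : Nat) : Int) := by
      simp only [List.length_cons, List.length_append, List.length_nil]; push_cast; omega
    have harr : pre ++ ((pvProcCells st (r.take colsN)).1 ++ r.drop colsN) :: rs
        = (pre ++ [(pvProcCells st (r.take colsN)).1 ++ r.drop colsN]) ++ rs := by simp
    rw [harr, hb1, hb2, ih _ (pvProcCells st (r.take colsN)).2 colsN (fun x hx => hlen x (by simp [hx]))]
    simp [pvProcRows, List.append_assoc]

theorem pv_index?_getElem (l : List String) (h : l.Nodup) (t : Nat) (ht : t < l.length) :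
    PySem.List.index? l l[t] = some t := by
  rw [PySem.List.index?_eq_idxOf?, List.idxOf?_eq_some_iff]
  refine ⟨ht, rfl, fun k hk hke => ?_⟩
  have := (List.Nodup.getElem_inj_iff h).mp hke
  omega

theorem pv_keys_codeOf (syms : List String) (h : syms.Nodup) : (pvCodeOf syms).keys = syms := by
  unfold pvCodeOf
  rw [PySem.Dict.keys_foldl_insert_key (PySem.List.enumerate syms) (fun p => p.2) (fun _ p => p.1)
      (PySem.Dict.empty : PySem.Dict String Int)]
  have hk : (PySem.Dict.empty : PySem.Dict String Int).keys = ([] : List String) := rfl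
  rw [hk, PySem.Set.update_nil_left, PySem.List.map_snd_enumerate, PySem.Set.ofList_eq_self_of_nodup _ h]

theorem pv_map_pair_enumerate (syms : List String) (h : syms.Nodup) :
    syms.map (fun k => (((pvCodeOf syms).getD k 0), k)) = PySem.List.enumerate syms 0 := by
  apply List.ext_getElem
  · simp [PySem.List.length_enumerate]
  · intro t ht1 ht2
    have hts : t < syms.length := by simpa using ht1
    simp only [List.getElem_map]
    rw [PySem.List.getElem_enumerate syms 0 t ht2]
    have hg : (pvCodeOf syms).getD syms[t] 0 = (t : Int) := by
      apply PySem.Dict.getD_of_get?_eq_some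
      rw [pv_get?_codeOf _ _ h, pv_index?_getElem syms h t hts]
    rw [hg]
    simp

theorem pv_invert_items (syms : List String) (h : syms.Nodup) :
    (syms.foldl (fun (r : PySem.Dict Int String) k => r.insert ((pvCodeOf syms).getD k 0) k)
        (PySem.Dict.empty : PySem.Dict Int String)).items
    = PySem.List.enumerate syms 0 := by
  have hkeys : (syms.map (fun k => (pvCodeOf syms).getD k 0)).Nodup := by
    have : syms.map (fun k => (pvCodeOf syms).getD k 0)
        = (PySem.List.enumerate syms 0).map (fun p => p.1) := by
      rw [← pv_map_pair_enumerate syms h, List.map_map]; rfl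
    rw [this, PySem.List.map_fst_enumerate]
    exact PySem.List.nodup_pyRange_one _ _
  rw [PySem.Dict.items_foldl_insert_fresh syms (fun k => (pvCodeOf syms).getD k 0) (fun k => k)
      PySem.Dict.empty (fun a _ => PySem.Dict.contains_empty _) hkeys]
  have : (PySem.Dict.empty : PySem.Dict Int String).items = [] := rfl
  rw [this, List.nil_append, pv_map_pair_enumerate syms h]

theorem pv_enum_items (syms : List String) :
    ((PySem.List.enumerate syms).foldl (fun (d : PySem.Dict Int String) p => d.insert p.1 p.2)
        PySem.Dict.empty).items
    = PySem.List.enumerate syms 0 := by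
  have hkeys : ((PySem.List.enumerate syms).map (fun p => p.1)).Nodup := by
    rw [PySem.List.map_fst_enumerate]
    exact PySem.List.nodup_pyRange_one _ _
  rw [PySem.Dict.items_foldl_insert_fresh (PySem.List.enumerate syms) (fun p => p.1) (fun p => p.2)
      PySem.Dict.empty (fun a _ => PySem.Dict.contains_empty _) hkeys]
  have : (PySem.Dict.empty : PySem.Dict Int String).items = [] := rfl
  rw [this, List.nil_append]
  simp

theorem pv_pair_cells (cells : List String) : ∀ (seen : PySem.Set String) (syms : List String),
    (∀ x : String, x ∈ seen ↔ x ∈ syms) →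
    ∃ seen' : PySem.Set String,
      (cells.foldl (fun (p : PySem.Set String × List String) elem =>
          if !isFloatStr elem && !(holeSymbols.contains elem) && !(PySem.Set.contains p.1 elem)
          then (PySem.Set.add p.1 elem, p.2 ++ [elem]) else p) (seen, syms))
        = (seen', pvCollectCells syms cells)
      ∧ (∀ x : String, x ∈ seen' ↔ x ∈ pvCollectCells syms cells) := by
  induction cells with
  | nil => intro seen syms h; exact ⟨seen, rfl, h⟩
  | cons e rest ih =>
    intro seen syms h
    have hcb : PySem.Set.contains seen e = syms.contains e := by
      rw [Bool.eq_iff_iff, PySem.Set.contains_iff]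
      simp only [List.contains_iff_mem]
      exact h e
    have hcond : (!isFloatStr e && !(holeSymbols.contains e) && !(PySem.Set.contains seen e))
        = (pvSymb e && !(syms.contains e)) := by
      rw [hcb]; unfold pvSymb; rw [Bool.and_assoc]
    simp only [List.foldl_cons, hcond]
    have hstep : pvCollectCells syms (e :: rest)
        = pvCollectCells (if (pvSymb e && !(syms.contains e)) = true then syms ++ [e] else syms) rest := by
      unfold pvCollectCells; simp [List.foldl_cons]
    rw [hstep]
    by_cases hc : (pvSymb e && !(syms.contains e)) = true
    · simp only [hc, if_pos]
      refine ih (PySem.Set.add seen e) (syms ++ [e]) ?_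
      intro x
      rw [PySem.Set.mem_add]
      simp [h x, or_comm]
    · simp only [if_neg hc]
      exact ih seen syms h

theorem pv_pair_rows (rows : List (List String)) (cols : Nat) : ∀ (seen : PySem.Set String) (syms : List String),
    (∀ x : String, x ∈ seen ↔ x ∈ syms) →
    ∃ seen' : PySem.Set String,
      (rows.foldl (fun (p : PySem.Set String × List String) row =>
          (row.take cols).foldl (fun (p : PySem.Set String × List String) elem =>
            if !isFloatStr elem && !(holeSymbols.contains elem) && !(PySem.Set.contains p.1 elem)
            then (PySem.Set.add p.1 elem, p.2 ++ [elem]) else p) p) (seen, syms))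
        = (seen', pvCollectRows syms cols rows)
      ∧ (∀ x : String, x ∈ seen' ↔ x ∈ pvCollectRows syms cols rows) := by
  induction rows with
  | nil => intro seen syms h; exact ⟨seen, rfl, h⟩
  | cons r rs ih =>
    intro seen syms h
    obtain ⟨seen1, heq1, h1⟩ := pv_pair_cells (r.take cols) seen syms h
    have hstep : pvCollectRows syms cols (r :: rs) = pvCollectRows (pvCollectCells syms (r.take cols)) cols rs := by
      unfold pvCollectRows; simp [List.foldl_cons]
    simp only [List.foldl_cons, heq1, hstep]
    exact ih seen1 _ h1

-- ===== VERDICT (by name: the statement is the Claim_ definition above) =====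
theorem convert_nonnumeric_attributes_to_numeric_spec : Claim_equal_convert_nonnumeric_attributes_to_numeric := by
  intro data _hdom hpre
  unfold Spec_convert_nonnumeric_attributes_to_numeric
  obtain ⟨hne, hlen⟩ := hpre
  cases data with
  | nil => exact absurd rfl hne
  | cons r0 rest =>
    have hl : ∀ r ∈ r0 :: rest, r0.length ≤ r.length := hlen
    have hcols : PySem.List.pyGetD (r0 :: rest) (0 : Int) [] = r0 := by
      have h := pv_pyGetD_append_cons ([] : List (List String)) r0 rest []
      rw [List.nil_append, List.length_nil, Nat.cast_zero] at h
      exact h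
    have houter := pv_outer (r0 :: rest) [] (PySem.Dict.empty, 0) r0.length hl
    simp only [List.nil_append, List.length_nil, Nat.cast_zero, zero_add] at houter
    have hinvnil : pvInv [] := ⟨List.nodup_nil, by simp⟩
    have hcollect := pv_procRows_collect r0.length (r0 :: rest) [] hinvnil
    have h0 : ((pvCodeOf [], ((([] : List String).length : Nat) : Int)) :
        PySem.Dict String Int × Int) = (PySem.Dict.empty, (0 : Int)) := by
      simp [pvCodeOf, PySem.List.enumerate_nil]
    rw [h0] at hcollect
    have hFinv : pvInv (pvCollectRows [] r0.length (r0 :: rest)) :=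
      pv_inv_collectRows _ _ _ hinvnil
    simp only [convert_nonnumeric_attributes_to_numeric,
      convert_nonnumeric_attributes_to_numeric_alt, PySem.List.len_eq, hcols, List.headD_cons]
    rw [houter, hcollect]
    obtain ⟨seen', hpair, _⟩ := pv_pair_rows (r0 :: rest) r0.length
      (PySem.Set.empty : PySem.Set String) ([] : List String) (fun x => Iff.rfl)
    rw [hpair]
    refine Prod.ext ?_ ?_
    · rfl
    · dsimp only
      rw [pv_keys_codeOf _ hFinv.1, pv_invert_items _ hFinv.1, pv_enum_items]
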